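-- pv_equiv track=rewrite | github.com/linhd-postdata/skas | src/rantanplan/rhymes.py | rhyme_codes_to_letters
-- ===== SOURCE A (Python) =====
-- import string
--
-- def rhyme_codes_to_letters(rhymes, unrhymed_verse_symbol="-"):
--     """Reorder rhyme letters so first rhyme is always an 'a'."""
--     sorted_rhymes = []
--     letters = {}
--     for rhyme in rhymes:
--         if rhyme < 0:  # unrhymed verse
--             rhyme_letter = unrhymed_verse_symbol
--         else:
--             if rhyme not in letters:
--                 letters[rhyme] = len(letters)
--             rhyme_letter = string.ascii_letters[letters[rhyme]]
--         sorted_rhymes.append(rhyme_letter)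
--     return sorted_rhymes
-- ===== SOURCE B (Python) =====
-- import string
--
--
-- def rhyme_codes_to_letters(rhymes, unrhymed_verse_symbol="-"):
--     """Reorder rhyme letters so first rhyme is always an 'a'."""
--     # First pass: ordered list of distinct non-negative codes (first appearance).
--     uniq = []
--     for rhyme in rhymes:
--         if rhyme >= 0 and rhyme not in uniq:
--             uniq.append(rhyme)
--     # Table: each distinct code -> its letter by first-appearance position.
--     table = {code: string.ascii_letters[i] for i, code in enumerate(uniq)}
--     # Second pass: label every verse.
--     return [unrhymed_verse_symbol if rhyme < 0 else table[rhyme]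
--             for rhyme in rhymes]
-- ===== Notes on version B (the rewrite author's own statement) =====
-- stated objective: alternative
-- what changed: Separates table construction from labeling: a first pass collects distinct non-negative codes in first-appearance order and builds a code-to-letter dict once, then a second pass maps each rhyme through the prebuilt table, instead of growing the dict and emitting letters in one fused loop.
import Mathlib
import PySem

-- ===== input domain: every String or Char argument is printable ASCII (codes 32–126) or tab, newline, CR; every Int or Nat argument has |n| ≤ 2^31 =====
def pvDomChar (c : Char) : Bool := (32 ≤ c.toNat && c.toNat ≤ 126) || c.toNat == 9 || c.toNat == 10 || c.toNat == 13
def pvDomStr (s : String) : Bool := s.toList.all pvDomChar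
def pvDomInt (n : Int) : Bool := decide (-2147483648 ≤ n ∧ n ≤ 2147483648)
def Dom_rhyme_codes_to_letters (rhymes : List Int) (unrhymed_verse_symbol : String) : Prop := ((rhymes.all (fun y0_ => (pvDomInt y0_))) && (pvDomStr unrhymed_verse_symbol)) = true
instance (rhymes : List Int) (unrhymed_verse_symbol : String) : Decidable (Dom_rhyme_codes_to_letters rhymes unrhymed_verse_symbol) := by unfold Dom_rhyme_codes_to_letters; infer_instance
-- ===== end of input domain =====

-- B builds the code→letter table in a first pass and labels in a second pass, instead of A's
-- fused loop growing the dict while emitting; equivalence is about return values (no mutation).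

-- ===== PORT A =====

-- string.ascii_letters
def asciiLetters : String := "abcdefghijklmnopqrstuvwxyzABCDEFGHIJKLMNOPQRSTUVWXYZ"

-- string.ascii_letters[i]; none = Python IndexError (53rd distinct code), excluded by Pre_;
-- totalized with "" there (both ports use the same helper, so nothing is claimed about it)
def pvLetter (i : Int) : String :=
  match PySem.Str.pyGet? asciiLetters i with
  | some c => String.ofList [c]
  | none => ""

-- one iteration of A's loop: state = (sorted_rhymes, letters)
def stepA (unrhymed_verse_symbol : String) (st : List String × PySem.Dict Int Int)
    (rhyme : Int) : List String × PySem.Dict Int Int :=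
  if rhyme < 0 then
    (st.1 ++ [unrhymed_verse_symbol], st.2)
  else
    -- if rhyme not in letters: letters[rhyme] = len(letters)
    let letters := if st.2.contains rhyme = false then st.2.insert rhyme (st.2.size : Int) else st.2
    -- letters[rhyme]: the key is always present here, so getD's default is never read
    let rhyme_letter := pvLetter (letters.getD rhyme 0)
    (st.1 ++ [rhyme_letter], letters)

def rhyme_codes_to_letters (rhymes : List Int) (unrhymed_verse_symbol : String) : List String :=
  (rhymes.foldl (stepA unrhymed_verse_symbol) ([], PySem.Dict.empty)).1

-- ===== PORT B =====

-- one iteration of B's first pass: append a not-yet-seen non-negative code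
def uniqAdd (u : List Int) (rhyme : Int) : List Int :=
  if 0 ≤ rhyme ∧ rhyme ∉ u then u ++ [rhyme] else u

def rhyme_codes_to_letters_alt (rhymes : List Int) (unrhymed_verse_symbol : String) : List String :=
  let uniq := rhymes.foldl uniqAdd []
  -- {code: string.ascii_letters[i] for i, code in enumerate(uniq)}
  let table : PySem.Dict Int String :=
    (PySem.List.enumerate uniq).foldl (fun t p => t.insert p.2 (pvLetter p.1)) PySem.Dict.empty
  -- table[rhyme]: every non-negative rhyme is a key of table, so getD's default is never read
  rhymes.map (fun rhyme =>
    if rhyme < 0 then unrhymed_verse_symbol else (table.get? rhyme).getD "")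

-- ===== PRECONDITION & SPEC =====
-- Pre_ excludes exactly the inputs on which the Python A raises IndexError: more than 52
-- distinct non-negative codes (string.ascii_letters has 52 letters).
def Pre_rhyme_codes_to_letters (rhymes : List Int) (unrhymed_verse_symbol : String) : Prop :=
  (PySem.List.dedup (rhymes.filter (fun r => 0 ≤ r))).length ≤ 52

instance (rhymes : List Int) (unrhymed_verse_symbol : String) : Decidable (Pre_rhyme_codes_to_letters rhymes unrhymed_verse_symbol) := by unfold Pre_rhyme_codes_to_letters; infer_instance

def pvWitness_rhyme_codes_to_letters : List Int × String := ([0, 2, -1, 0, 2, 5], "-")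

def Spec_rhyme_codes_to_letters (rhymes : List Int) (unrhymed_verse_symbol : String) (out : List String) : Prop := out = rhyme_codes_to_letters_alt rhymes unrhymed_verse_symbol
instance (rhymes : List Int) (unrhymed_verse_symbol : String) (out : List String) : Decidable (Spec_rhyme_codes_to_letters rhymes unrhymed_verse_symbol out) := by unfold Spec_rhyme_codes_to_letters; infer_instance

-- ===== CLAIM (what is proved, stated in full; the proofs are below) =====
def Claim_equal_rhyme_codes_to_letters : Prop := ∀ (rhymes : List Int) (unrhymed_verse_symbol : String), Dom_rhyme_codes_to_letters rhymes unrhymed_verse_symbol → Pre_rhyme_codes_to_letters rhymes unrhymed_verse_symbol → Spec_rhyme_codes_to_letters rhymes unrhymed_verse_symbol (rhyme_codes_to_letters rhymes unrhymed_verse_symbol)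

-- ===== LEMMAS AND PROOFS =====

-- the common value both loops compute: label by index in the final uniques list
def labelOf (U : List Int) (sym : String) (r : Int) : String :=
  if r < 0 then sym else pvLetter (U.idxOf r : Int)

lemma uniq_prefix (xs : List Int) : ∀ u : List Int, u <+: xs.foldl uniqAdd u := by
  induction xs with
  | nil => intro u; exact List.prefix_rfl
  | cons x xs ih =>
    intro u
    refine List.IsPrefix.trans ?_ (ih (uniqAdd u x))
    unfold uniqAdd; split
    · exact ⟨[x], rfl⟩
    · exact List.prefix_rfl

lemma idxOf_of_prefix {u U : List Int} (h : u <+: U) {r : Int} (hr : r ∈ u) :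
    U.idxOf r = u.idxOf r := by
  obtain ⟨t, rfl⟩ := h
  exact List.idxOf_append_of_mem hr

lemma mem_uniq_foldl_of_mem (xs : List Int) : ∀ u : List Int, ∀ r ∈ u, r ∈ xs.foldl uniqAdd u := by
  intro u r hr
  exact (uniq_prefix xs u).subset hr

lemma mem_uniq_foldl (xs : List Int) : ∀ u : List Int, ∀ r ∈ xs, 0 ≤ r → r ∈ xs.foldl uniqAdd u := by
  induction xs with
  | nil => intro u r hr; simp at hr
  | cons x xs ih =>
    intro u r hr h0
    rcases List.mem_cons.mp hr with h | h
    · subst h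
      refine mem_uniq_foldl_of_mem xs (uniqAdd u r) r ?_
      unfold uniqAdd; split
      · simp
      · rename_i hc
        rcases Decidable.em (r ∈ u) with hm | hm
        · exact hm
        · exact absurd ⟨h0, hm⟩ hc
    · exact ih (uniqAdd u x) r h h0

lemma uniq_nodup_nonneg (xs : List Int) : ∀ u : List Int, u.Nodup → (∀ k ∈ u, 0 ≤ k) →
    (xs.foldl uniqAdd u).Nodup ∧ (∀ k ∈ xs.foldl uniqAdd u, 0 ≤ k) := by
  induction xs with
  | nil => intro u h1 h2; exact ⟨h1, h2⟩
  | cons x xs ih =>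
    intro u h1 h2
    refine ih (uniqAdd u x) ?_ ?_
    · unfold uniqAdd; split
      · rename_i hc
        simpa [List.nodup_append] using ⟨h1, fun a ha h => hc.2 (h ▸ ha)⟩
      · exact h1
    · unfold uniqAdd; split
      · rename_i hc
        intro k hk
        rcases List.mem_append.mp hk with h | h
        · exact h2 k h
        · simp at h; omega
      · exact h2

-- A's loop, with its dict characterized by the seen-uniques list u
lemma loopA (sym : String) (xs : List Int) :
    ∀ (u : List Int) (acc : List String) (d : PySem.Dict Int Int),
      u.Nodup → (∀ k ∈ u, 0 ≤ k) →
      d.keys = u → (∀ k ∈ u, d.getD k 0 = (u.idxOf k : Int)) →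
      (xs.foldl (stepA sym) (acc, d)).1
        = acc ++ xs.map (labelOf (xs.foldl uniqAdd u) sym) := by
  induction xs with
  | nil => intro u acc d _ _ _ _; simp
  | cons x xs ih =>
    intro u acc d hnd hnn hkeys hget
    by_cases hx : x < 0
    · -- unrhymed verse: state dict unchanged, uniqAdd drops x
      have hu : uniqAdd u x = u := by unfold uniqAdd; rw [if_neg]; omega
      rw [List.foldl_cons, List.map_cons]
      show (xs.foldl (stepA sym) (stepA sym (acc, d) x)).1 = _
      rw [show stepA sym (acc, d) x = (acc ++ [sym], d) by simp [stepA, hx]]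
      rw [List.foldl_cons, hu, ih u (acc ++ [sym]) d hnd hnn hkeys hget]
      simp [labelOf, hx]
    · by_cases hmem : x ∈ u
      · -- seen code: dict unchanged
        have hu : uniqAdd u x = u := by unfold uniqAdd; rw [if_neg]; simp [hmem]
        have hcont : d.contains x = true := by
          rw [PySem.Dict.contains_iff_mem_keys, hkeys]; exact hmem
        have hstep : stepA sym (acc, d) x = (acc ++ [pvLetter (d.getD x 0)], d) := by
          simp [stepA, hx, hcont]
        have hidx : (List.foldl uniqAdd u xs).idxOf x = u.idxOf x :=
          idxOf_of_prefix (uniq_prefix xs u) hmem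
        rw [List.foldl_cons, List.map_cons, hstep, List.foldl_cons, hu,
          ih u _ d hnd hnn hkeys hget]
        simp [labelOf, hx, hidx, hget x hmem]
      · -- new code: append x to the seen list, insert it into the dict at index u.length
        have hu : uniqAdd u x = u ++ [x] := by unfold uniqAdd; rw [if_pos]; exact ⟨by omega, hmem⟩
        have hcont : d.contains x = false := by
          rw [Bool.eq_false_iff]
          intro hc
          exact hmem (hkeys ▸ (PySem.Dict.contains_iff_mem_keys d x).mp hc)
        have hsize : (d.size : Int) = (u.length : Int) := by
          have : d.keys.length = u.length := by rw [hkeys]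
          simp only [PySem.Dict.keys, List.length_map] at this
          simp [PySem.Dict.size, this]
        have hstep : stepA sym (acc, d) x
            = (acc ++ [pvLetter ((d.insert x (d.size : Int)).getD x 0)],
               d.insert x (d.size : Int)) := by
          simp [stepA, hx, hcont]
        have hnd' : (u ++ [x]).Nodup := by
          simpa [List.nodup_append] using ⟨hnd, fun a ha h => hmem (h ▸ ha)⟩
        have hnn' : ∀ k ∈ u ++ [x], 0 ≤ k := by
          intro k hk
          rcases List.mem_append.mp hk with h | h
          · exact hnn k h
          · simp at h; omega
        have hkeys' : (d.insert x (d.size : Int)).keys = u ++ [x] := by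
          rw [PySem.Dict.keys_insert_of_not_contains _ _ hcont, hkeys]
        have hget' : ∀ k ∈ u ++ [x],
            (d.insert x (d.size : Int)).getD k 0 = ((u ++ [x]).idxOf k : Int) := by
          intro k hk
          rw [PySem.Dict.getD_insert]
          rcases List.mem_append.mp hk with h | h
          · have hne : k ≠ x := fun he => hmem (he ▸ h)
            rw [if_neg hne, hget k h, List.idxOf_append_of_mem h]
          · simp at h; subst h
            rw [if_pos rfl, hsize, List.idxOf_append_of_notMem hmem]
            simp
        have hidx : (List.foldl uniqAdd (u ++ [x]) xs).idxOf x = u.length := by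
          rw [idxOf_of_prefix (uniq_prefix xs (u ++ [x])) (by simp),
            List.idxOf_append_of_notMem hmem]
          simp
        rw [List.foldl_cons, List.map_cons, hstep, List.foldl_cons, hu,
          ih (u ++ [x]) _ _ hnd' hnn' hkeys' hget']
        have hgx : (d.insert x (d.size : Int)).getD x 0 = (u.length : Int) := by
          rw [PySem.Dict.getD_insert, if_pos rfl, hsize]
        simp [labelOf, hx, hidx, hgx]

-- B's table looks up the index in uniq
lemma tableB (U : List Int) (hnd : U.Nodup) (r : Int) (hr : r ∈ U) :
    (((PySem.List.enumerate U).foldl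
        (fun t p => t.insert p.2 (pvLetter p.1)) PySem.Dict.empty).get? r).getD ""
      = pvLetter (U.idxOf r : Int) := by
  have hitems : ((PySem.List.enumerate U).foldl
      (fun (t : PySem.Dict Int String) p => t.insert p.2 (pvLetter p.1)) PySem.Dict.empty).items
      = (PySem.List.enumerate U).map (fun p => (p.2, pvLetter p.1)) := by
    have h := PySem.Dict.items_foldl_insert_fresh (l := PySem.List.enumerate U)
      (k := fun p => p.2) (v := fun p => pvLetter p.1) (d := PySem.Dict.empty)
      (by intro a _; simp) (by rw [PySem.List.map_snd_enumerate]; exact hnd)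
    simpa using h
  have hkeys : ((PySem.List.enumerate U).foldl
      (fun (t : PySem.Dict Int String) p => t.insert p.2 (pvLetter p.1)) PySem.Dict.empty).keys
      = U := by
    simp only [PySem.Dict.keys, hitems, List.map_map, Function.comp_def]
    exact PySem.List.map_snd_enumerate U 0
  have hmem : (r, pvLetter (U.idxOf r : Int)) ∈ ((PySem.List.enumerate U).foldl
      (fun (t : PySem.Dict Int String) p => t.insert p.2 (pvLetter p.1)) PySem.Dict.empty).items := by
    rw [hitems]
    refine List.mem_map.mpr ⟨((U.idxOf r : Int), r), ?_, rfl⟩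
    have hk : U.idxOf r < U.length := List.idxOf_lt_length_of_mem hr
    rw [PySem.List.mem_enumerate_iff]
    exact ⟨U.idxOf r, hk, by simp [List.getElem_idxOf]⟩
  rw [PySem.Dict.get?_of_mem_items _ hmem (by rw [hkeys]; exact hnd)]
  rfl

lemma altB (rhymes : List Int) (sym : String) :
    rhyme_codes_to_letters_alt rhymes sym
      = rhymes.map (labelOf (rhymes.foldl uniqAdd []) sym) := by
  unfold rhyme_codes_to_letters_alt
  apply List.map_eq_map_iff.mpr
  intro r hr
  by_cases h : r < 0
  · simp [labelOf, h]
  · rw [if_neg h, labelOf, if_neg h]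
    exact tableB _ (uniq_nodup_nonneg rhymes [] (by simp) (by simp)).1 r
      (mem_uniq_foldl rhymes [] r hr (by omega))

-- ===== VERDICT (by name: the statement is the Claim_ definition above) =====
theorem rhyme_codes_to_letters_spec : Claim_equal_rhyme_codes_to_letters := by
  intro rhymes sym _ _
  unfold Spec_rhyme_codes_to_letters rhyme_codes_to_letters
  rw [altB]
  simpa using loopA sym rhymes [] [] PySem.Dict.empty (by simp) (by simp) (by simp) (by simp)
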